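-- pv_equiv track=rewrite | github.com/elitan/adventofcode | 2018/06/main.py | winning_coordinate
-- ===== SOURCE A (Python) =====
-- def winning_coordinate(coordinate_data):
--
--     # find a winner
--     min_coordinate = min(coordinate_data.items(), key=lambda x: x[1])
--
--     # find possible tie
--     for k, v in coordinate_data.items():
--
--         # skipp same
--         if k == min_coordinate[0]:
--             continue
--
--         # return None if tie between two nodes
--         if v == min_coordinate[1]:
--             return None
--
--     # solo winner
--     return min_coordinate[0]
-- ===== SOURCE B (Python) =====
-- def winning_coordinate(coordinate_data):
--     # Single pass: track the first minimal key, its value, and how many entries share that value.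
--     best_key = None
--     best_val = None
--     ties = 0
--     for k, v in coordinate_data.items():
--         if best_val is None or v < best_val:
--             best_key, best_val, ties = k, v, 1
--         elif v == best_val:
--             ties += 1
--     if best_val is None:
--         raise ValueError("winning_coordinate() arg is an empty dict")
--     return best_key if ties == 1 else None
-- ===== Notes on version B (the rewrite author's own statement) =====
-- stated objective: alternative
-- what changed: B replaces A's two-pass scheme (min() over the items, then a full rescan for a tie) by a single fold that maintains the first minimal key, its value and a count of entries sharing that value.
-- outside the precondition, e.g. on winning_coordinate({}): A raises ValueError, B raises ValueError
import Mathlib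
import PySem

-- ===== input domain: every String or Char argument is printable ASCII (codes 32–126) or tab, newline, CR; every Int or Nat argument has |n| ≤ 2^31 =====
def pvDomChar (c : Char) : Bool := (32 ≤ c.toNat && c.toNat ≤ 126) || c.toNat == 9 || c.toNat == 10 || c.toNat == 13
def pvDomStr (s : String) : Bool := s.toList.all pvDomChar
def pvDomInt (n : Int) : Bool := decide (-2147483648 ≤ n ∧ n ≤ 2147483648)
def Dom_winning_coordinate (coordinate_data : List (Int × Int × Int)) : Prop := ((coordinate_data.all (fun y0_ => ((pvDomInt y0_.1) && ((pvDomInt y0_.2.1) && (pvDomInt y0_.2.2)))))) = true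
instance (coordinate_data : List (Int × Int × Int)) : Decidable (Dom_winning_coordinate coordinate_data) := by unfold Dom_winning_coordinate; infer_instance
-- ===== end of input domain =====

-- B replaces A's two-pass min()-then-rescan by one fold keeping (first min key, min value, tie count); same cost, different decomposition.


-- ===== PORT A =====
-- the 'for k, v in coordinate_data.items():' tie-scan with its early 'return None'
def winningLoop (mk : Int × Int) (mv : Int) : List (Int × Int × Int) → Option (Int × Int)
  | [] => some mk
  | e :: rest =>
    if (e.1, e.2.1) = mk then winningLoop mk mv rest
    else if e.2.2 = mv then none
    else winningLoop mk mv rest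

def winning_coordinate (coordinate_data : List (Int × Int × Int)) : Option (Int × Int) :=
  match PySem.List.min? coordinate_data (fun x => x.2.2) with
  | none => none   -- Python: min() raises ValueError on an empty dict; excluded by Pre_
  | some m => winningLoop (m.1, m.2.1) m.2.2 coordinate_data

-- ===== PORT B =====
-- one step of Source B's loop: state = (best (key, value) if any yet, tie count)
def altStep (acc : Option ((Int × Int) × Int) × Int) (e : Int × Int × Int) :
    Option ((Int × Int) × Int) × Int :=
  match acc with
  | (none, _) => (some ((e.1, e.2.1), e.2.2), 1)
  | (some (bk, bv), t) =>
    if e.2.2 < bv then (some ((e.1, e.2.1), e.2.2), 1)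
    else if e.2.2 = bv then (some (bk, bv), t + 1)
    else (some (bk, bv), t)

def winning_coordinate_alt (coordinate_data : List (Int × Int × Int)) : Option (Int × Int) :=
  match coordinate_data.foldl altStep (none, 0) with
  | (none, _) => none   -- empty dict: Source B raises ValueError; excluded by Pre_
  | (some (bk, _), t) => if t = 1 then some bk else none

-- ===== PRECONDITION & SPEC =====
-- Pre_ excludes the empty list (A's min() raises ValueError there, and B raises ValueError too) and
-- association lists with a repeated key, which do not represent any Python dict input.
def Pre_winning_coordinate (coordinate_data : List (Int × Int × Int)) : Prop :=
  coordinate_data ≠ [] ∧ (coordinate_data.map (fun e => (e.1, e.2.1))).Nodup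
instance (coordinate_data : List (Int × Int × Int)) : Decidable (Pre_winning_coordinate coordinate_data) := by unfold Pre_winning_coordinate; infer_instance

def pvWitness_winning_coordinate : (List (Int × Int × Int)) := [(0, 0, 3), (1, 1, 2), (2, 0, 5)]

def Spec_winning_coordinate (coordinate_data : List (Int × Int × Int)) (out : Option (Int × Int)) : Prop := out = winning_coordinate_alt coordinate_data
instance (coordinate_data : List (Int × Int × Int)) (out : Option (Int × Int)) : Decidable (Spec_winning_coordinate coordinate_data out) := by unfold Spec_winning_coordinate; infer_instance

-- ===== CLAIM (what is proved, stated in full; the proofs are below) =====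
def Claim_equal_winning_coordinate : Prop := ∀ (coordinate_data : List (Int × Int × Int)), Dom_winning_coordinate coordinate_data → Pre_winning_coordinate coordinate_data → Spec_winning_coordinate coordinate_data (winning_coordinate coordinate_data)

-- ===== LEMMAS AND PROOFS =====

-- the fold hidden inside PySem.List.min?, named so it can be reasoned about
def minStep (acc : Option (Int × Int × Int)) (x : Int × Int × Int) : Option (Int × Int × Int) :=
  match acc with
  | none => some x
  | some m => if x.2.2 < m.2.2 then some x else some m

theorem min?_eq_foldl_minStep (l : List (Int × Int × Int)) :
    PySem.List.min? l (fun x => x.2.2) = l.foldl minStep none := by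
  simp only [PySem.List.min?]
  apply PySem.List.foldl_congr_mem
  intro acc x _
  cases acc with
  | none => rfl
  | some m => rfl

theorem foldl_minStep_eq_none (l : List (Int × Int × Int)) :
    l.foldl minStep none = none ↔ l = [] := by
  rw [← min?_eq_foldl_minStep]
  exact PySem.List.min?_eq_none_iff l (fun x => x.2.2)

theorem foldl_minStep_acc (l : List (Int × Int × Int)) (a : Int × Int × Int) :
    l.foldl minStep (some a) =
      (l.foldl minStep none).elim (some a) (fun m => if m.2.2 < a.2.2 then some m else some a) := by
  induction l generalizing a with
  | nil => rfl
  | cons e rest ih =>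
    have hcons : (e :: rest).foldl minStep none = rest.foldl minStep (some e) := rfl
    rw [hcons, List.foldl_cons]
    rcases hM : rest.foldl minStep none with _ | m
    · have hrest : rest = [] := (foldl_minStep_eq_none rest).1 hM
      subst hrest
      simp [minStep, Option.elim]
    · have ihe : rest.foldl minStep (some e) = if m.2.2 < e.2.2 then some m else some e := by
        rw [ih e, hM]; rfl
      have iha : rest.foldl minStep (some a) = if m.2.2 < a.2.2 then some m else some a := by
        rw [ih a, hM]; rfl
      rw [ihe]
      by_cases h : e.2.2 < a.2.2
      · rw [show minStep (some a) e = some e from by simp [minStep, h], ihe]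
        by_cases hm1 : m.2.2 < e.2.2
        · rw [if_pos hm1]
          simp only [Option.elim]
          rw [if_pos (by omega)]
        · rw [if_neg hm1]
          simp only [Option.elim]
          rw [if_pos h]
      · rw [show minStep (some a) e = some a from by simp [minStep, h], iha]
        by_cases hm1 : m.2.2 < e.2.2
        · rw [if_pos hm1]
          simp only [Option.elim]
        · rw [if_neg hm1]
          simp only [Option.elim]
          rw [if_neg (by omega), if_neg (by omega)]

def cntV (v : Int) (l : List (Int × Int × Int)) : Nat :=
  l.countP (fun e => decide (e.2.2 = v))

theorem cntV_cons (v : Int) (e : Int × Int × Int) (l : List (Int × Int × Int)) :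
    cntV v (e :: l) = (if e.2.2 = v then 1 else 0) + cntV v l := by
  simp only [cntV, List.countP_cons, decide_eq_true_eq]
  split_ifs <;> omega

theorem foldl_altStep_some (l : List (Int × Int × Int)) (bk : Int × Int) (bv : Int) (t : Int) :
    l.foldl altStep (some (bk, bv), t) =
      (l.foldl minStep none).elim (some (bk, bv), t)
        (fun m =>
          if m.2.2 < bv then (some ((m.1, m.2.1), m.2.2), (cntV m.2.2 l : Int))
          else (some (bk, bv), t + (cntV bv l : Int))) := by
  induction l generalizing bk bv t with
  | nil => rfl
  | cons e rest ih =>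
    have hcons : (e :: rest).foldl minStep none = rest.foldl minStep (some e) := rfl
    rw [hcons, foldl_minStep_acc, List.foldl_cons]
    rcases hM : rest.foldl minStep none with _ | m
    · have hrest : rest = [] := (foldl_minStep_eq_none rest).1 hM
      subst hrest
      simp only [Option.elim]
      by_cases h1 : e.2.2 < bv
      · rw [show altStep (some (bk, bv), t) e = (some ((e.1, e.2.1), e.2.2), 1) from by
          simp [altStep, h1], if_pos h1]
        simp [cntV]
      · by_cases h2 : e.2.2 = bv
        · rw [show altStep (some (bk, bv), t) e = (some (bk, bv), t + 1) from by
            simp [altStep, h1, h2], if_neg h1]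
          simp [cntV, h2]
        · rw [show altStep (some (bk, bv), t) e = (some (bk, bv), t) from by
            simp [altStep, h1, h2], if_neg h1]
          simp [cntV, h2]
    · simp only [Option.elim]
      by_cases hm1 : m.2.2 < e.2.2
      · rw [if_pos hm1]
        simp only [Option.elim]
        by_cases h1 : e.2.2 < bv
        · rw [show altStep (some (bk, bv), t) e = (some ((e.1, e.2.1), e.2.2), 1) from by
            simp [altStep, h1], ih, hM]
          simp only [Option.elim]
          rw [if_pos hm1, if_pos (by omega), cntV_cons, if_neg (by omega)]
          simp
        · by_cases h2 : e.2.2 = bv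
          · rw [show altStep (some (bk, bv), t) e = (some (bk, bv), t + 1) from by
              simp [altStep, h1, h2], ih, hM]
            simp only [Option.elim]
            by_cases hmb : m.2.2 < bv
            · rw [if_pos hmb, if_pos hmb, cntV_cons, if_neg (by omega)]
              simp
            · rw [if_neg hmb, if_neg hmb, cntV_cons, if_pos h2]
              push_cast
              ring_nf
          · rw [show altStep (some (bk, bv), t) e = (some (bk, bv), t) from by
              simp [altStep, h1, h2], ih, hM]
            simp only [Option.elim]
            by_cases hmb : m.2.2 < bv
            · rw [if_pos hmb, if_pos hmb, cntV_cons, if_neg (by omega)]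
              simp
            · rw [if_neg hmb, if_neg hmb, cntV_cons, if_neg h2]
              simp
      · rw [if_neg hm1]
        simp only [Option.elim]
        by_cases h1 : e.2.2 < bv
        · rw [show altStep (some (bk, bv), t) e = (some ((e.1, e.2.1), e.2.2), 1) from by
            simp [altStep, h1], ih, hM]
          simp only [Option.elim]
          rw [if_neg hm1, if_pos h1, cntV_cons, if_pos rfl]
          push_cast
          rfl
        · by_cases h2 : e.2.2 = bv
          · rw [show altStep (some (bk, bv), t) e = (some (bk, bv), t + 1) from by
              simp [altStep, h1, h2], ih, hM]
            simp only [Option.elim]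
            rw [if_neg (by omega), if_neg (by omega), cntV_cons, if_pos h2]
            push_cast
            ring_nf
          · rw [show altStep (some (bk, bv), t) e = (some (bk, bv), t) from by
              simp [altStep, h1, h2], ih, hM]
            simp only [Option.elim]
            rw [if_neg (by omega), if_neg (by omega), cntV_cons, if_neg h2]
            simp

theorem foldl_altStep_none (cd : List (Int × Int × Int)) (m : Int × Int × Int)
    (hm : cd.foldl minStep none = some m) :
    cd.foldl altStep ((none : Option ((Int × Int) × Int)), (0 : Int)) =
      (some ((m.1, m.2.1), m.2.2), (cntV m.2.2 cd : Int)) := by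
  rcases cd with _ | ⟨e, rest⟩
  · simp [List.foldl] at hm
  · have hstep : (e :: rest).foldl altStep ((none : Option ((Int × Int) × Int)), (0 : Int)) =
        rest.foldl altStep (some ((e.1, e.2.1), e.2.2), 1) := rfl
    have hmcons : (e :: rest).foldl minStep none = rest.foldl minStep (some e) := rfl
    rw [hmcons, foldl_minStep_acc] at hm
    rw [hstep, foldl_altStep_some]
    rcases hM : rest.foldl minStep none with _ | m'
    · have hrest : rest = [] := (foldl_minStep_eq_none rest).1 hM
      subst hrest
      simp only [hM, Option.elim] at hm ⊢
      cases hm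
      simp [cntV]
    · rw [hM] at hm
      simp only [Option.elim] at hm ⊢
      by_cases hm1 : m'.2.2 < e.2.2
      · rw [if_pos hm1] at hm
        cases hm
        rw [if_pos hm1, cntV_cons, if_neg (by omega)]
        simp
      · rw [if_neg hm1] at hm
        cases hm
        rw [if_neg (by omega), cntV_cons, if_pos rfl]
        push_cast
        ring_nf

theorem winningLoop_spec (mk : Int × Int) (mv : Int) (l : List (Int × Int × Int)) :
    winningLoop mk mv l =
      if ∃ e ∈ l, (e.1, e.2.1) ≠ mk ∧ e.2.2 = mv then none else some mk := by
  induction l with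
  | nil => simp [winningLoop]
  | cons e rest ih =>
    by_cases hk : (e.1, e.2.1) = mk
    · simp only [winningLoop, if_pos hk, ih]
      congr 1
      simp only [List.mem_cons, eq_iff_iff]
      constructor
      · rintro ⟨x, hx, h⟩; exact ⟨x, .inr hx, h⟩
      · rintro ⟨x, hx | hx, h⟩
        · exact absurd (hx ▸ hk) h.1
        · exact ⟨x, hx, h⟩
    · by_cases hv : e.2.2 = mv
      · simp only [winningLoop, if_neg hk, if_pos hv]
        rw [if_pos ⟨e, .head _, hk, hv⟩]
      · simp only [winningLoop, if_neg hk, if_neg hv, ih]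
        congr 1
        simp only [List.mem_cons, eq_iff_iff]
        constructor
        · rintro ⟨x, hx, h⟩; exact ⟨x, .inr hx, h⟩
        · rintro ⟨x, hx | hx, h⟩
          · exact absurd (hx ▸ h.2) hv
          · exact ⟨x, hx, h⟩

theorem cnt_eq_one_iff (cd : List (Int × Int × Int)) (m : Int × Int × Int)
    (hmem : m ∈ cd) (hnd : (cd.map (fun e => (e.1, e.2.1))).Nodup) :
    cntV m.2.2 cd = 1 ↔ ¬ ∃ e ∈ cd, (e.1, e.2.1) ≠ (m.1, m.2.1) ∧ e.2.2 = m.2.2 := by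
  have hndl : cd.Nodup := hnd.of_map
  have hinj : ∀ x ∈ cd, ∀ y ∈ cd, (x.1, x.2.1) = (y.1, y.2.1) → x = y := fun x hx y hy hxy =>
    List.inj_on_of_nodup_map hnd hx hy hxy
  have hfil : (cd.filter (fun e => decide (e.2.2 = m.2.2))).Nodup := hndl.filter _
  have hmf : m ∈ cd.filter (fun e => decide (e.2.2 = m.2.2)) := by
    simp [List.mem_filter, hmem]
  have hlen : cntV m.2.2 cd = (cd.filter (fun e => decide (e.2.2 = m.2.2))).length := by
    simp [cntV, List.countP_eq_length_filter]
  constructor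
  · rintro h1 ⟨e, he, hke, hve⟩
    have hef : e ∈ cd.filter (fun e => decide (e.2.2 = m.2.2)) := by
      simp [List.mem_filter, he, hve]
    have hne : e ≠ m := fun h => hke (by rw [h])
    have hcard := List.toFinset_card_of_nodup hfil
    have hsub : ({e, m} : Finset (Int × Int × Int)) ⊆
        (cd.filter (fun e => decide (e.2.2 = m.2.2))).toFinset := by
      intro x hx
      simp only [Finset.mem_insert, Finset.mem_singleton] at hx
      rcases hx with rfl | rfl
      · rw [List.mem_toFinset]; exact hef
      · rw [List.mem_toFinset]; exact hmf
    have h2 := Finset.card_le_card hsub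
    rw [Finset.card_pair hne, hcard] at h2
    omega
  · intro h
    have hall : ∀ x ∈ cd.filter (fun e => decide (e.2.2 = m.2.2)), x = m := by
      intro x hx
      simp only [List.mem_filter, decide_eq_true_eq] at hx
      by_cases hkx : (x.1, x.2.1) = (m.1, m.2.1)
      · exact hinj x hx.1 m hmem hkx
      · exact absurd ⟨x, hx.1, hkx, hx.2⟩ h
    rcases hF : cd.filter (fun e => decide (e.2.2 = m.2.2)) with _ | ⟨a, _ | ⟨b, tl⟩⟩
    · rw [hF] at hmf; simp at hmf
    · simp [hlen, hF]
    · exfalso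
      rw [hF] at hfil hall
      have ha : a = m := hall a (.head _)
      have hb : b = m := hall b (.tail _ (.head _))
      rw [List.nodup_cons] at hfil
      exact hfil.1 (by rw [ha, ← hb]; exact .head _)

-- ===== VERDICT (by name: the statement is the Claim_ definition above) =====
theorem winning_coordinate_spec : Claim_equal_winning_coordinate := by
  intro cd _ hpre
  obtain ⟨hne, hnd⟩ := hpre
  unfold Spec_winning_coordinate
  unfold winning_coordinate winning_coordinate_alt
  rcases hm : PySem.List.min? cd (fun x => x.2.2) with _ | m
  · exact absurd ((PySem.List.min?_eq_none_iff cd (fun x => x.2.2)).1 hm) hne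
  · have hm' : cd.foldl minStep none = some m := by rw [← min?_eq_foldl_minStep]; exact hm
    have hmem : m ∈ cd := PySem.List.min?_mem hm
    rw [foldl_altStep_none cd m hm']
    show winningLoop (m.1, m.2.1) m.2.2 cd =
      if ((cntV m.2.2 cd : Int)) = 1 then some (m.1, m.2.1) else none
    rw [winningLoop_spec]
    have hiff := cnt_eq_one_iff cd m hmem hnd
    by_cases hex : ∃ e ∈ cd, (e.1, e.2.1) ≠ (m.1, m.2.1) ∧ e.2.2 = m.2.2
    · rw [if_pos hex, if_neg (by
        intro hc
        have : cntV m.2.2 cd = 1 := by exact_mod_cast hc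
        exact (hiff.1 this) hex)]
    · rw [if_neg hex, if_pos (by exact_mod_cast hiff.2 hex)]
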